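-- pv_equiv track=rewrite | github.com/jopagaro/extract | engine/normalize/assay_normalizer.py | _check_qaqc
-- ===== SOURCE A (Python) =====
-- _BLANK_KEYWORDS = {"blank", "blk", "qaqc_blank", "neg_blank", "negative_blank"}
--
-- _STD_KEYWORDS = {"std", "standard", "cert", "certified", "crm", "reference"}
--
-- _DUP_KEYWORDS = {"dup", "duplicate", "field_dup", "quarter_core", "twin"}
--
-- def _check_qaqc(interval_rows: list[dict]) -> list[str]:
--     """
--     Simple QAQC completeness check.
--     Looks for blanks, standards, and duplicates in sample_id or hole_id fields.
--     Returns warnings for missing QAQC types.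
--     """
--     warnings: list[str] = []
--     has_blanks = False
--     has_standards = False
--     has_duplicates = False
--
--     for row in interval_rows:
--         sample_id = str(row.get("sample_id") or "").lower()
--         hole_id = str(row.get("hole_id") or "").lower()
--         combined = sample_id + " " + hole_id
--
--         if any(kw in combined for kw in _BLANK_KEYWORDS):
--             has_blanks = True
--         if any(kw in combined for kw in _STD_KEYWORDS):
--             has_standards = True
--         if any(kw in combined for kw in _DUP_KEYWORDS):
--             has_duplicates = True
--
--     if not has_blanks:
--         warnings.append(
--             "QAQC: No blank samples detected in assay data. "
--             "Blanks are required to assess contamination. "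
--             "Assay accuracy cannot be independently verified."
--         )
--     if not has_standards:
--         warnings.append(
--             "QAQC: No certified reference material (standard) samples detected. "
--             "Standards are required to verify laboratory accuracy and bias. "
--             "Grade reliability cannot be confirmed without standards."
--         )
--     if not has_duplicates:
--         warnings.append(
--             "QAQC: No duplicate samples detected. "
--             "Field and/or laboratory duplicates are needed to assess precision. "
--             "Grade variability from sampling error cannot be quantified."
--         )
--
--     return warnings
-- ===== SOURCE B (Python) =====
-- _BLANK_KEYWORDS = {"blank", "blk", "qaqc_blank", "neg_blank", "negative_blank"}
--
-- _STD_KEYWORDS = {"std", "standard", "cert", "certified", "crm", "reference"}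
--
-- _DUP_KEYWORDS = {"dup", "duplicate", "field_dup", "quarter_core", "twin"}
--
--
-- def _check_qaqc(interval_rows: list[dict]) -> list[str]:
--     # Aggregate-then-check: one lowercased corpus joined with spaces
--     # (keywords contain no space, so matching in the corpus equals
--     # matching in some row's field), then three whole-corpus scans.
--     corpus = " ".join(
--         str(v or "").lower()
--         for row in interval_rows
--         for v in (row.get("sample_id"), row.get("hole_id"))
--     )
--     warnings: list[str] = []
--     if not any(kw in corpus for kw in _BLANK_KEYWORDS):
--         warnings.append(
--             "QAQC: No blank samples detected in assay data. "
--             "Blanks are required to assess contamination. "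
--             "Assay accuracy cannot be independently verified."
--         )
--     if not any(kw in corpus for kw in _STD_KEYWORDS):
--         warnings.append(
--             "QAQC: No certified reference material (standard) samples detected. "
--             "Standards are required to verify laboratory accuracy and bias. "
--             "Grade reliability cannot be confirmed without standards."
--         )
--     if not any(kw in corpus for kw in _DUP_KEYWORDS):
--         warnings.append(
--             "QAQC: No duplicate samples detected. "
--             "Field and/or laboratory duplicates are needed to assess precision. "
--             "Grade variability from sampling error cannot be quantified."
--         )
--     return warnings
-- ===== Notes on version B (the rewrite author's own statement) =====
-- stated objective: alternative
-- what changed: Replaces the per-row loop that maintains three boolean flags with building one space-joined lowercased corpus of all sample_id/hole_id fields and doing three whole-corpus any(kw in corpus) checks; warnings are emitted from those aggregate checks.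
import Mathlib
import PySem

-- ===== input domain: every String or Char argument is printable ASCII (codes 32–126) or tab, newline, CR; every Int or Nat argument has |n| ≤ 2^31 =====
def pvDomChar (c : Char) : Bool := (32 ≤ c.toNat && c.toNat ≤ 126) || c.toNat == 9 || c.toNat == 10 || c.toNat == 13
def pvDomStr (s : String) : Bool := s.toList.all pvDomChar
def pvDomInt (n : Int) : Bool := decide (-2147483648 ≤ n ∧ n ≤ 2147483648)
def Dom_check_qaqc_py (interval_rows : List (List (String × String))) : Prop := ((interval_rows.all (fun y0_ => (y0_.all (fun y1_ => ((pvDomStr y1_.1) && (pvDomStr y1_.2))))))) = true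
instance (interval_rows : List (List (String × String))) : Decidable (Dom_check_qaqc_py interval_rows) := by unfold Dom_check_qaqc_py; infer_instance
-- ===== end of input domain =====

-- B replaces A's per-row flag-maintaining loop by one space-joined lowercased corpus
-- checked with three whole-corpus keyword scans (alternative decomposition, same cost).

-- shared module constants and the shared field extraction str(row.get(k) or "").lower()
def pvBlankKws : List (List Char) := ["blank".toList, "blk".toList, "qaqc_blank".toList, "neg_blank".toList, "negative_blank".toList]
def pvStdKws : List (List Char) := ["std".toList, "standard".toList, "cert".toList, "certified".toList, "crm".toList, "reference".toList]
def pvDupKws : List (List Char) := ["dup".toList, "duplicate".toList, "field_dup".toList, "quarter_core".toList, "twin".toList]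
def pvMsgBlank : String := "QAQC: No blank samples detected in assay data. Blanks are required to assess contamination. Assay accuracy cannot be independently verified."
def pvMsgStd : String := "QAQC: No certified reference material (standard) samples detected. Standards are required to verify laboratory accuracy and bias. Grade reliability cannot be confirmed without standards."
def pvMsgDup : String := "QAQC: No duplicate samples detected. Field and/or laboratory duplicates are needed to assess precision. Grade variability from sampling error cannot be quantified."
def pvField (row : List (String × String)) (k : String) : List Char :=
  PySem.Chars.lower (((PySem.Dict.get? (PySem.Dict.mk row) k).getD "").toList)

-- ===== PORT A =====
def check_qaqc_py (interval_rows : List (List (String × String))) : List String :=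
  let fl : Bool × Bool × Bool := interval_rows.foldl
    (fun (fl : Bool × Bool × Bool) row =>
      let combined := pvField row "sample_id" ++ ' ' :: pvField row "hole_id"
      (fl.1 || pvBlankKws.any (fun kw => PySem.Chars.isIn kw combined),
       fl.2.1 || pvStdKws.any (fun kw => PySem.Chars.isIn kw combined),
       fl.2.2 || pvDupKws.any (fun kw => PySem.Chars.isIn kw combined)))
    (false, false, false)
  (if fl.1 then [] else [pvMsgBlank]) ++
  (if fl.2.1 then [] else [pvMsgStd]) ++
  (if fl.2.2 then [] else [pvMsgDup])

-- ===== PORT B =====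
def check_qaqc_py_alt (interval_rows : List (List (String × String))) : List String :=
  let corpus := PySem.Chars.join [' ']
    (interval_rows.flatMap (fun row => [pvField row "sample_id", pvField row "hole_id"]))
  (if pvBlankKws.any (fun kw => PySem.Chars.isIn kw corpus) then [] else [pvMsgBlank]) ++
  (if pvStdKws.any (fun kw => PySem.Chars.isIn kw corpus) then [] else [pvMsgStd]) ++
  (if pvDupKws.any (fun kw => PySem.Chars.isIn kw corpus) then [] else [pvMsgDup])

-- ===== PRECONDITION & SPEC =====
def Spec_check_qaqc_py (interval_rows : List (List (String × String))) (out : List String) : Prop := out = check_qaqc_py_alt interval_rows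
instance (interval_rows : List (List (String × String))) (out : List String) : Decidable (Spec_check_qaqc_py interval_rows out) := by unfold Spec_check_qaqc_py; infer_instance

-- ===== CLAIM (what is proved, stated in full; the proofs are below) =====
def Claim_equal_check_qaqc_py : Prop := ∀ (interval_rows : List (List (String × String))), Dom_check_qaqc_py interval_rows → Spec_check_qaqc_py interval_rows (check_qaqc_py interval_rows)

-- ===== LEMMAS AND PROOFS =====

-- a space-free pattern that is a prefix of a ++ ' ' :: b is a prefix of a
theorem pv_prefix_sep_mp (sub : List Char) :
    ∀ a b : List Char, (' ' : Char) ∉ sub → sub <+: a ++ ' ' :: b → sub <+: a := by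
  induction sub with
  | nil => intro a b _ _; exact List.nil_prefix
  | cons c s ih =>
    intro a b h1 h
    cases a with
    | nil =>
      simp only [List.nil_append, List.cons_prefix_cons] at h
      exact absurd (h.1 ▸ List.mem_cons_self) h1
    | cons x a' =>
      simp only [List.cons_append, List.cons_prefix_cons] at h ⊢
      exact ⟨h.1, ih a' b (fun hm => h1 (List.mem_cons_of_mem _ hm)) h.2⟩

theorem pv_prefix_sep (sub a b : List Char) (h1 : (' ' : Char) ∉ sub) :
    sub <+: a ++ ' ' :: b ↔ sub <+: a := by
  constructor
  · exact pv_prefix_sep_mp sub a b h1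
  · intro h
    exact h.trans (by simp)

-- a nonempty space-free pattern is an infix of a ++ ' ' :: b iff it is an infix of a or of b
theorem pv_infix_sep (sub a b : List Char) (h1 : (' ' : Char) ∉ sub) (h2 : sub ≠ []) :
    sub <:+: a ++ ' ' :: b ↔ sub <:+: a ∨ sub <:+: b := by
  induction a with
  | nil =>
    simp only [List.nil_append, List.infix_cons_iff]
    constructor
    · rintro (hp | hi)
      · cases sub with
        | nil => exact absurd rfl h2
        | cons c s =>
          simp only [List.cons_prefix_cons] at hp
          exact absurd (hp.1 ▸ List.mem_cons_self) h1
      · exact Or.inr hi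
    · rintro (hi | hi)
      · rw [List.infix_nil] at hi; exact absurd hi h2
      · exact Or.inr hi
  | cons x a' ih =>
    simp only [List.cons_append, List.infix_cons_iff] at *
    rw [show x :: (a' ++ ' ' :: b) = (x :: a') ++ ' ' :: b from rfl,
        pv_prefix_sep sub (x :: a') b h1, ih]
    tauto

-- kw found in the space-joined corpus iff found in one of the parts
theorem pv_isIn_join (kw : List Char) (h1 : (' ' : Char) ∉ kw) (h2 : kw ≠ []) :
    ∀ parts : List (List Char),
      PySem.Chars.isIn kw (PySem.Chars.join [' '] parts) = parts.any (fun p => PySem.Chars.isIn kw p)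
  | [] => by
    rw [PySem.Chars.join_nil, List.any_nil, PySem.Chars.isIn_eq_false_iff, List.infix_nil]
    exact h2
  | [p] => by rw [PySem.Chars.join_singleton, List.any_cons, List.any_nil, Bool.or_false]
  | p :: q :: rest => by
    rw [PySem.Chars.join_cons_cons, List.append_assoc, List.singleton_append, List.any_cons]
    rw [Bool.eq_iff_iff, Bool.or_eq_true]
    rw [PySem.Chars.isIn_iff_infix, pv_infix_sep kw p _ h1 h2]
    rw [← pv_isIn_join kw h1 h2 (q :: rest)]
    rw [PySem.Chars.isIn_iff_infix, PySem.Chars.isIn_iff_infix]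

-- A's flag-accumulating fold computed in closed form
theorem pv_foldl_flags (rows : List (List (String × String)))
    (f1 f2 f3 : List (String × String) → Bool) :
    ∀ x y z : Bool,
      rows.foldl (fun (fl : Bool × Bool × Bool) row =>
        (fl.1 || f1 row, fl.2.1 || f2 row, fl.2.2 || f3 row)) (x, y, z)
      = (x || rows.any f1, y || rows.any f2, z || rows.any f3) := by
  induction rows with
  | nil => intro x y z; simp
  | cons r t ih =>
    intro x y z
    rw [List.foldl_cons, List.any_cons, List.any_cons, List.any_cons]
    rw [ih]
    simp [Bool.or_assoc]

-- the per-keyword-group boolean of B equals the one A accumulates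
theorem pv_any_corpus (K : List (List Char))
    (hK : ∀ kw ∈ K, (' ' : Char) ∉ kw ∧ kw ≠ []) (rows : List (List (String × String))) :
    K.any (fun kw => PySem.Chars.isIn kw (PySem.Chars.join [' ']
        (rows.flatMap (fun row => [pvField row "sample_id", pvField row "hole_id"]))))
    = rows.any (fun row => K.any (fun kw =>
        PySem.Chars.isIn kw (pvField row "sample_id" ++ ' ' :: pvField row "hole_id"))) := by
  rw [Bool.eq_iff_iff]
  simp only [List.any_eq_true]
  constructor
  · rintro ⟨kw, hkw, hin⟩
    obtain ⟨hsp, hne⟩ := hK kw hkw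
    rw [pv_isIn_join kw hsp hne] at hin
    rw [List.any_eq_true] at hin
    obtain ⟨p, hp, hpin⟩ := hin
    rw [List.mem_flatMap] at hp
    obtain ⟨row, hrow, hpmem⟩ := hp
    refine ⟨row, hrow, kw, hkw, ?_⟩
    rw [PySem.Chars.isIn_iff_infix, pv_infix_sep kw _ _ hsp hne]
    simp only [List.mem_cons, List.not_mem_nil, or_false] at hpmem
    rcases hpmem with h | h
    · exact Or.inl (h ▸ (PySem.Chars.isIn_iff_infix _ _).mp hpin)
    · exact Or.inr (h ▸ (PySem.Chars.isIn_iff_infix _ _).mp hpin)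
  · rintro ⟨row, hrow, kw, hkw, hin⟩
    obtain ⟨hsp, hne⟩ := hK kw hkw
    refine ⟨kw, hkw, ?_⟩
    rw [pv_isIn_join kw hsp hne, List.any_eq_true]
    rw [PySem.Chars.isIn_iff_infix, pv_infix_sep kw _ _ hsp hne] at hin
    rcases hin with h | h
    · exact ⟨pvField row "sample_id", List.mem_flatMap.mpr ⟨row, hrow, by simp⟩,
        (PySem.Chars.isIn_iff_infix _ _).mpr h⟩
    · exact ⟨pvField row "hole_id", List.mem_flatMap.mpr ⟨row, hrow, by simp⟩,
        (PySem.Chars.isIn_iff_infix _ _).mpr h⟩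

-- ===== VERDICT (by name: the statement is the Claim_ definition above) =====
theorem check_qaqc_py_spec : Claim_equal_check_qaqc_py := by
  intro rows _
  unfold Spec_check_qaqc_py check_qaqc_py check_qaqc_py_alt
  rw [pv_foldl_flags rows
    (fun row => pvBlankKws.any (fun kw => PySem.Chars.isIn kw (pvField row "sample_id" ++ ' ' :: pvField row "hole_id")))
    (fun row => pvStdKws.any (fun kw => PySem.Chars.isIn kw (pvField row "sample_id" ++ ' ' :: pvField row "hole_id")))
    (fun row => pvDupKws.any (fun kw => PySem.Chars.isIn kw (pvField row "sample_id" ++ ' ' :: pvField row "hole_id")))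
    false false false]
  simp [pv_any_corpus pvBlankKws (by decide) rows,
        pv_any_corpus pvStdKws (by decide) rows,
        pv_any_corpus pvDupKws (by decide) rows]
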